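-- pv_equiv track=rewrite | github.com/PavPar/pyhw | Первые задания/Домашнее задание/slide_3/tasks_3.py | draw_3
-- ===== SOURCE A (Python) =====
-- def draw_3(w, h, f, symbol):
--     base = ' ' * (w)
--     base = list(base)
--     for i in range(0, w):
--         if i < f or i > w - f - 1:
--             base[i] = symbol
--     base = ''.join(base)
--     rect = [base for _ in range(0, h + 1)]
--     for i in range(0, h + 1):
--         if i < f or i > h - f:
--             rect[i] = symbol * w
--     return rect
-- ===== SOURCE B (Python) =====
-- def draw_3(w, h, f, symbol):
--     return [''.join(symbol if r < f or r > h - f or c < f or c > w - f - 1 else ' '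
--                     for c in range(w))
--             for r in range(h + 1)]
-- ===== Notes on version B (the rewrite author's own statement) =====
-- stated objective: simpler
-- what changed: A builds a shared base row by mutating a char list and then overrides whole border rows with symbol*w; B is a single nested comprehension computing every cell directly from a 2D border-membership predicate.
import Mathlib
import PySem

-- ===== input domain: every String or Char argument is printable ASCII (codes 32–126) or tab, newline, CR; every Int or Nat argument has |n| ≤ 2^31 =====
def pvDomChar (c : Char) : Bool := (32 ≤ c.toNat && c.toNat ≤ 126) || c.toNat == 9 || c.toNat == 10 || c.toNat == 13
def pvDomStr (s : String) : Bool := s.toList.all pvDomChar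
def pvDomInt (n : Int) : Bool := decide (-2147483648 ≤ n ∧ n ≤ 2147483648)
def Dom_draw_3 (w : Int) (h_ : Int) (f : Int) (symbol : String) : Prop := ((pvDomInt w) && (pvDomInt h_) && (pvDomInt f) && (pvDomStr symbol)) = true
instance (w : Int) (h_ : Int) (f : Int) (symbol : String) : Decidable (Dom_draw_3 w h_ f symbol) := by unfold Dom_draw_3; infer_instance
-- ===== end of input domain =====

-- B replaces A's two-phase base-row build + border-row override by one direct per-cell predicate; objective: simpler.

-- symbol * n (Python string repetition; '' for n <= 0) — exact by construction
def pyStrMul (s : String) (n : Int) : String := PySem.Str.join "" (List.replicate n.toNat s)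

-- ===== PORT A =====
def draw_3 (w : Int) (h_ : Int) (f : Int) (symbol : String) : List String :=
  -- base = list(' ' * w): w one-character space strings (empty for w <= 0)
  let base : List String := List.replicate w.toNat " "
  let base := (PySem.List.pyRange 0 w 1).foldl
    (fun b i => if i < f ∨ i > w - f - 1 then PySem.List.pySetD b i symbol else b) base
  let baseS := PySem.Str.join "" base
  let rect := (PySem.List.pyRange 0 (h_ + 1) 1).map (fun _ => baseS)
  (PySem.List.pyRange 0 (h_ + 1) 1).foldl
    (fun r i => if i < f ∨ i > h_ - f then PySem.List.pySetD r i (pyStrMul symbol w) else r) rect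

-- ===== PORT B =====
def draw_3_alt (w : Int) (h_ : Int) (f : Int) (symbol : String) : List String :=
  (PySem.List.pyRange 0 (h_ + 1) 1).map (fun r =>
    PySem.Str.join "" ((PySem.List.pyRange 0 w 1).map (fun c =>
      if r < f ∨ r > h_ - f ∨ c < f ∨ c > w - f - 1 then symbol else " ")))

-- ===== PRECONDITION & SPEC =====
def Spec_draw_3 (w : Int) (h_ : Int) (f : Int) (symbol : String) (out : List String) : Prop := out = draw_3_alt w h_ f symbol
instance (w : Int) (h_ : Int) (f : Int) (symbol : String) (out : List String) : Decidable (Spec_draw_3 w h_ f symbol out) := by unfold Spec_draw_3; infer_instance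

-- ===== CLAIM (what is proved, stated in full; the proofs are below) =====
def Claim_equal_draw_3 : Prop := ∀ (w : Int) (h_ : Int) (f : Int) (symbol : String), Dom_draw_3 w h_ f symbol → Spec_draw_3 w h_ f symbol (draw_3 w h_ f symbol)

-- ===== LEMMAS AND PROOFS =====

-- A fold over range(0, m) that conditionally sets index i to the constant v
-- yields the pointwise if-then-else list (for a list of length >= m).
theorem foldl_setD_range {α : Type} (P : Int → Prop) [DecidablePred P] (v : α) :
    ∀ (m : Nat) (xs : List α), m ≤ xs.length →
    ((List.range m).map (fun (k : Nat) => (k : Int))).foldl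
      (fun b i => if P i then PySem.List.pySetD b i v else b) xs
    = (List.range m).map (fun (k : Nat) => if P (k : Int) then v else xs.getD k v) ++ xs.drop m := by
  intro m
  induction m with
  | zero => intro xs h; simp
  | succ m ih =>
    intro xs h
    have hm : m < xs.length := by omega
    rw [List.range_succ, List.map_append, List.foldl_append, ih xs (by omega)]
    have hlen : ((List.range m).map (fun (k : Nat) => if P (k : Int) then v else xs.getD k v)).length = m := by simp
    have hdrop : xs.drop m = xs[m] :: xs.drop (m + 1) := List.drop_eq_getElem_cons hm
    simp only [List.foldl_cons, List.foldl_nil, List.map_append, List.map_cons, List.map_nil]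
    by_cases hP : P (m : Int)
    · rw [if_pos hP, if_pos hP, PySem.List.pySetD_natCast, List.set_append, hlen,
        if_neg (lt_irrefl m), Nat.sub_self, hdrop, List.set_cons_zero, List.append_assoc]
      rfl
    · rw [if_neg hP, if_neg hP, hdrop, List.getD_eq_getElem xs v hm]
      simp

theorem draw_3_spec : Claim_equal_draw_3 := by
  intro w h_ f symbol _
  unfold Spec_draw_3 draw_3 draw_3_alt
  rw [PySem.List.pyRange_one 0 w, PySem.List.pyRange_one 0 (h_ + 1)]
  simp only [sub_zero, zero_add]
  have hbase := foldl_setD_range (fun i => i < f ∨ i > w - f - 1) symbol w.toNat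
      (List.replicate w.toNat " ") (by simp)
  simp only [] at hbase
  rw [hbase]
  simp only [List.drop_replicate, Nat.sub_self, List.replicate_zero, List.append_nil]
  simp only [List.map_map, Function.comp_def]
  have hrows := foldl_setD_range (fun i => i < f ∨ i > h_ - f) (pyStrMul symbol w) (h_ + 1).toNat
      ((List.range (h_ + 1).toNat).map (fun _ =>
        PySem.Str.join "" ((List.range w.toNat).map (fun (k : Nat) =>
          if (k : Int) < f ∨ (k : Int) > w - f - 1 then symbol
          else (List.replicate w.toNat " ").getD k symbol)))) (by simp)
  simp only [] at hrows
  rw [hrows]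
  rw [List.drop_eq_nil_of_le (by simp), List.append_nil]
  apply List.map_congr_left
  intro k hk
  have hk' : k < (h_ + 1).toNat := List.mem_range.mp hk
  by_cases hQ : ((k : Int) < f ∨ (k : Int) > h_ - f)
  · rw [if_pos hQ]
    have hall : ∀ c ∈ List.range w.toNat,
        (if (k : Int) < f ∨ (k : Int) > h_ - f ∨ (c : Int) < f ∨ (c : Int) > w - f - 1
         then symbol else " ") = symbol := by
      intro c _
      rcases hQ with h1 | h1 <;> simp [h1]
    rw [List.map_congr_left hall, List.map_const']
    simp [pyStrMul]
  · rw [if_neg hQ]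
    rw [List.getD_eq_getElem _ _ (by simpa using hk')]
    simp only [List.getElem_map]
    congr 1
    apply List.map_congr_left
    intro c hc
    have hc' : c < w.toNat := List.mem_range.mp hc
    by_cases hC : ((c : Int) < f ∨ (c : Int) > w - f - 1)
    · push Not at hQ
      rcases hC with h1 | h1 <;> simp [h1]
    · push Not at hQ
      push Not at hC
      rw [if_neg (by omega), if_neg (by push Not; omega)]
      rw [List.getD_eq_getElem _ _ (by simpa using hc')]
      simp
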